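-- pv_equiv track=rewrite | github.com/dannybd/puzzcord | bot_extensions/solving_tools.py | _all_rotn
-- ===== SOURCE A (Python) =====
-- import string
--
-- def _all_rotn(msg):
--     lower = string.ascii_lowercase * 2
--     upper = string.ascii_uppercase * 2
--     chars = []
--     for c in msg:
--         if c in lower:
--             chars.append(lower[lower.index(c):][:26])
--             continue
--         if c in upper:
--             chars.append(upper[upper.index(c):][:26])
--             continue
--         chars.append(c * 26)
--     return [''.join(x) for x in zip(*chars)]
-- ===== SOURCE B (Python) =====
-- def _all_rotn(msg):
--     if not msg:
--         return []
--     out = []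
--     for n in range(26):
--         row = []
--         for c in msg:
--             o = ord(c)
--             if 97 <= o <= 122:
--                 row.append(chr((o - 97 + n) % 26 + 97))
--             elif 65 <= o <= 90:
--                 row.append(chr((o - 65 + n) % 26 + 65))
--             else:
--                 row.append(c)
--         out.append(''.join(row))
--     return out
-- ===== Notes on version B (the rewrite author's own statement) =====
-- stated objective: alternative
-- what changed: B loops over the shift n=0..25 on the outside and builds each rotation directly with modular character arithmetic, instead of A's per-character slices of doubled alphabets transposed via zip(*chars).
import Mathlib
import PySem

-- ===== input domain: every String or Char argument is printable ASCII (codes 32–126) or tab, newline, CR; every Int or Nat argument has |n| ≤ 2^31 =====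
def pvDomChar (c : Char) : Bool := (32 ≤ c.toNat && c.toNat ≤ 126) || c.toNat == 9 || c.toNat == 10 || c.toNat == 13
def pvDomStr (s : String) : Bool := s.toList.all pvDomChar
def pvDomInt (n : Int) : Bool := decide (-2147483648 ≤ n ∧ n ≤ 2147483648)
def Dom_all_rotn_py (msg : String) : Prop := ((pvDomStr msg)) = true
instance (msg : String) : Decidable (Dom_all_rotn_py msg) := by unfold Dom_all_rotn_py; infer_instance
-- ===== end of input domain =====

-- B builds each of the 26 rotations directly (shift-major loop with modular character
-- arithmetic) instead of A's per-character alphabet slices transposed by zip(*chars).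

-- ===== PORT A =====
-- string.ascii_lowercase * 2 / string.ascii_uppercase * 2
def pvLower2 : List Char := "abcdefghijklmnopqrstuvwxyzabcdefghijklmnopqrstuvwxyz".toList
def pvUpper2 : List Char := "ABCDEFGHIJKLMNOPQRSTUVWXYZABCDEFGHIJKLMNOPQRSTUVWXYZ".toList

-- body of A's "for c in msg" loop: the 26-character row appended for one character c
def pvRowA (c : Char) : List Char :=
  if c ∈ pvLower2 then (pvLower2.drop (pvLower2.idxOf c)).take 26
  else if c ∈ pvUpper2 then (pvUpper2.drop (pvUpper2.idxOf c)).take 26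
  else List.replicate 26 c

-- Python zip(*rows): columns until the shortest row runs out (exact; zip of no rows is empty)
def pvZipStar : List (List Char) → List (List Char)
  | [] => []
  | r :: rs =>
    if (r :: rs).any (fun l => l.isEmpty) then []
    else ((r :: rs).map (fun l => l.headI)) :: pvZipStar ((r :: rs).map (fun l => l.tail))
termination_by rows => (rows.headD []).length
decreasing_by
  rename_i h
  simp only [List.map_cons, List.headD_cons, List.any_cons, Bool.or_eq_true, List.isEmpty_iff] at *
  cases r with
  | nil => simp at h
  | cons a as => simp

def all_rotn_py (msg : String) : List String :=
  (pvZipStar (msg.toList.map pvRowA)).map String.mk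

-- ===== PORT B =====
def pvRotChar (n : Nat) (c : Char) : Char :=
  let o := c.toNat
  if 97 ≤ o ∧ o ≤ 122 then Char.ofNat ((o - 97 + n) % 26 + 97)
  else if 65 ≤ o ∧ o ≤ 90 then Char.ofNat ((o - 65 + n) % 26 + 65)
  else c

def all_rotn_py_alt (msg : String) : List String :=
  if msg = "" then []
  else (List.range 26).map (fun n => String.mk (msg.toList.map (pvRotChar n)))

-- ===== PRECONDITION & SPEC =====
def Spec_all_rotn_py (msg : String) (out : List String) : Prop := out = all_rotn_py_alt msg
instance (msg : String) (out : List String) : Decidable (Spec_all_rotn_py msg out) := by unfold Spec_all_rotn_py; infer_instance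

-- ===== CLAIM (what is proved, stated in full; the proofs are below) =====
def Claim_equal_all_rotn_py : Prop := ∀ (msg : String), Dom_all_rotn_py msg → Spec_all_rotn_py msg (all_rotn_py msg)

-- ===== LEMMAS AND PROOFS =====

-- per-character agreement of the two ports, checked for every code point below 127
set_option maxRecDepth 40000 in
theorem pvRow_key : ∀ o : Nat, o < 127 →
    pvRowA (Char.ofNat o) = (List.range 26).map (fun n => pvRotChar n (Char.ofNat o)) := by
  decide

theorem pvRowA_eq (c : Char) (h : pvDomChar c = true) :
    pvRowA c = (List.range 26).map (fun n => pvRotChar n c) := by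
  have hb : c.toNat < 127 := by
    simp [pvDomChar] at h
    omega
  have hk := pvRow_key c.toNat hb
  rwa [Char.ofNat_toNat] at hk

theorem pvZipStar_cons (r : List Char) (rs : List (List Char)) :
    pvZipStar (r :: rs) =
      if (r :: rs).any (fun l => l.isEmpty) then []
      else ((r :: rs).map (fun l => l.headI)) :: pvZipStar ((r :: rs).map (fun l => l.tail)) := by
  rw [pvZipStar]

-- transposing the rectangular matrix whose row for character c is l.map (pvRotChar · c)
theorem pvZipStar_rot (l : List Nat) (c : Char) (cs : List Char) :
    pvZipStar ((c :: cs).map (fun c => l.map (fun n => pvRotChar n c)))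
      = l.map (fun n => (c :: cs).map (fun c => pvRotChar n c)) := by
  induction l generalizing c cs with
  | nil =>
    simp only [List.map_cons]
    rw [pvZipStar_cons, if_pos (by simp)]
    simp
  | cons n rest ih =>
    simp only [List.map_cons]
    rw [pvZipStar_cons, if_neg (by simp)]
    congr 1
    · simp [List.map_map, Function.comp_def]
    · have h2 : List.map (fun l => l.tail)
          ((pvRotChar n c :: List.map (fun n => pvRotChar n c) rest) ::
            List.map (fun c => pvRotChar n c :: List.map (fun n => pvRotChar n c) rest) cs)
          = (c :: cs).map (fun c => rest.map (fun n => pvRotChar n c)) := by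
        simp [List.map_map, Function.comp_def]
      rw [h2, ih c cs]
      simp

-- ===== VERDICT (by name: the statement is the Claim_ definition above) =====
theorem all_rotn_py_spec : Claim_equal_all_rotn_py := by
  intro msg hdom
  unfold Spec_all_rotn_py all_rotn_py all_rotn_py_alt
  have hall : ∀ c ∈ msg.toList, pvDomChar c = true := by
    simpa [Dom_all_rotn_py, pvDomStr, List.all_eq_true] using hdom
  by_cases hmsg : msg = ""
  · subst hmsg
    simp [pvZipStar]
  · rw [if_neg hmsg]
    obtain ⟨c, cs, hcons⟩ : ∃ c cs, msg.toList = c :: cs := by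
      cases h : msg.toList with
      | nil => exact absurd (String.toList_eq_nil_iff.mp h) hmsg
      | cons c cs => exact ⟨c, cs, rfl⟩
    rw [hcons]
    have hmap : (c :: cs).map pvRowA
        = (c :: cs).map (fun c => (List.range 26).map (fun n => pvRotChar n c)) := by
      apply List.map_congr_left
      intro x hx
      exact pvRowA_eq x (hall x (hcons ▸ hx))
    rw [hmap, pvZipStar_rot, List.map_map]
    simp [Function.comp_def]
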